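-- pv_equiv track=rewrite | github.com/jay-thakur/geeksforgeeks_py | practice/Basic/set_all_odd_bits.py | set_all_odd_bits
-- ===== SOURCE A (Python) =====
-- def set_all_odd_bits(n):
--     temp = n
--     i = 0
--     while temp > 0:
--         if i % 2 == 0:
--             n = n | (1 << i)
--         i += 1
--         temp >>= 1
--     return n
-- ===== SOURCE B (Python) =====
-- def set_all_odd_bits(n):
--     if n <= 0:
--         return n
--     k = (n.bit_length() + 1) // 2
--     return n | ((4 ** k - 1) // 3)
-- ===== Notes on version B (the rewrite author's own statement) =====
-- stated objective: simpler
-- what changed: Replaces A's per-bit while loop with a closed form: from n.bit_length() it computes the count k of even bit positions and ORs n once with the alternating mask of k set even bits built arithmetically in a single step.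
import Mathlib
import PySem

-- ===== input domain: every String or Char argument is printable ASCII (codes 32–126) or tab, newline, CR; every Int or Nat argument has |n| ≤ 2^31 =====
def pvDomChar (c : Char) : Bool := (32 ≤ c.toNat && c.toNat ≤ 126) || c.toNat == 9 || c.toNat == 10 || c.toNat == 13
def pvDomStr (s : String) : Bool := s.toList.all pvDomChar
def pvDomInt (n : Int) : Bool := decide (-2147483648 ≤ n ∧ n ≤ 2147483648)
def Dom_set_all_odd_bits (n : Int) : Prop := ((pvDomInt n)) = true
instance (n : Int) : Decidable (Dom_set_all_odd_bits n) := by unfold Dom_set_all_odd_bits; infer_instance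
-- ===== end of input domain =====

-- B replaces A's per-bit loop with a closed-form alternating mask built from bit_length and a single OR (simpler).


-- ===== PORT A =====
-- the while loop: state (temp, n, i); 'temp >>= 1' is '>>> 1', 'n | (1 << i)' is PySem.Int.bor / '<<<'
def pvLoop (temp n : Int) (i : Nat) : Int :=
  if 0 < temp then
    pvLoop (temp >>> (1:Nat)) (if i % 2 == 0 then PySem.Int.bor n ((1 : Int) <<< i) else n) (i + 1)
  else n
termination_by temp.toNat
decreasing_by
  simp only [Int.shiftRight_eq_div_pow, pow_one]
  omega

def set_all_odd_bits (n : Int) : Int := pvLoop n n 0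

-- ===== PORT B =====
def set_all_odd_bits_alt (n : Int) : Int :=
  if n ≤ 0 then n
  else
    let k : Nat := (PySem.Int.bitLength n + 1) / 2
    PySem.Int.bor n (PySem.Int.floordiv ((4 : Int) ^ k - 1) 3)

-- ===== PRECONDITION & SPEC =====
def Spec_set_all_odd_bits (n : Int) (out : Int) : Prop := out = set_all_odd_bits_alt n
instance (n : Int) (out : Int) : Decidable (Spec_set_all_odd_bits n out) := by unfold Spec_set_all_odd_bits; infer_instance

-- ===== CLAIM (what is proved, stated in full; the proofs are below) =====
def Claim_equal_set_all_odd_bits : Prop := ∀ (n : Int), Dom_set_all_odd_bits n → Spec_set_all_odd_bits n (set_all_odd_bits n)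

-- ===== LEMMAS AND PROOFS =====

-- the OR of 1<<<j over even j in [i, i+len), as a Nat
def orMask : Nat → Nat → Nat
  | _, 0 => 0
  | i, len + 1 => (if i % 2 == 0 then 1 <<< i else 0) ||| orMask (i + 1) len

theorem bor_assoc_nn (a b c : Int) (ha : 0 ≤ a) (hb : 0 ≤ b) (hc : 0 ≤ c) :
    PySem.Int.bor (PySem.Int.bor a b) c = PySem.Int.bor a (PySem.Int.bor b c) := by
  rw [PySem.Int.bor_of_nonneg ha hb, PySem.Int.bor_of_nonneg hb hc,
      PySem.Int.bor_of_nonneg (by positivity) hc, PySem.Int.bor_of_nonneg ha (by positivity)]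
  simp [Nat.lor_assoc]

theorem one_shiftLeft_cast (i : Nat) : (((1 <<< i : Nat) : Int)) = (1 : Int) <<< i := by
  simp [Nat.shiftLeft_eq, Int.shiftLeft_eq]

theorem pvLoop_eq (temp n : Int) (i : Nat) :
    0 ≤ n →
    pvLoop temp n i
      = PySem.Int.bor n ((orMask i (if 0 < temp then PySem.Int.bitLength temp else 0) : Nat) : Int) := by
  induction temp, n, i using pvLoop.induct with
  | case1 temp n i h ih =>
    intro hn
    have ht' : (0 : Int) ≤ temp >>> (1:Nat) := by
      simp only [Int.shiftRight_eq_div_pow, pow_one]; omega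
    have hshift : temp >>> (1:Nat) = PySem.Int.floordiv temp 2 := by
      rw [PySem.Int.floordiv_eq_ediv_of_pos (by norm_num), Int.shiftRight_eq_div_pow]
      norm_num
    have hL : PySem.Int.bitLength temp = PySem.Int.bitLength (temp >>> (1:Nat)) + 1 := by
      rw [hshift]; exact PySem.Int.bitLength_of_pos h
    have hlen : (if 0 < temp >>> (1:Nat) then PySem.Int.bitLength (temp >>> (1:Nat)) else 0)
        = PySem.Int.bitLength (temp >>> (1:Nat)) := by
      by_cases h2 : 0 < temp >>> (1:Nat)
      · simp [h2]
      · have hz : temp >>> (1:Nat) = 0 := le_antisymm (by omega) ht'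
        simp [hz]
    rw [pvLoop]
    simp only [h, if_true, hL]
    by_cases he : i % 2 == 0
    · have hb : (0 : Int) ≤ (1 : Int) <<< i := by
        rw [← one_shiftLeft_cast]; positivity
      have hn' : 0 ≤ PySem.Int.bor n ((1 : Int) <<< i) := by
        rw [PySem.Int.bor_of_nonneg hn hb]; positivity
      rw [dif_pos he] at ih
      rw [if_pos he]
      rw [ih hn', hlen]
      simp only [orMask, he, if_true]
      rw [← PySem.Int.bor_natCast, one_shiftLeft_cast]
      exact bor_assoc_nn n _ _ hn hb (Int.natCast_nonneg _)
    · rw [dif_neg he] at ih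
      rw [if_neg he]
      rw [ih hn, hlen]
      simp only [orMask, he]
      simp
  | case2 temp n i h =>
    intro hn
    rw [pvLoop]
    simp [h, orMask]

theorem mask_closed_nat : ∀ L : Nat, L < 33 → orMask 0 L = (4 ^ ((L + 1) / 2) - 1) / 3 := by
  decide

theorem mask_closed (L : Nat) (h : L < 33) :
    ((orMask 0 L : Nat) : Int)
      = PySem.Int.floordiv ((4 : Int) ^ ((L + 1) / 2) - 1) 3 := by
  have h1 : (1 : Nat) ≤ 4 ^ ((L + 1) / 2) := Nat.one_le_pow _ _ (by norm_num)
  have hc : ((4 : Int) ^ ((L + 1) / 2) - 1) = ((4 ^ ((L + 1) / 2) - 1 : Nat) : Int) := by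
    push_cast [h1]; ring
  rw [PySem.Int.floordiv_eq_ediv_of_pos (by norm_num), mask_closed_nat L h, hc]
  exact_mod_cast (Int.natCast_div _ _)

theorem bl_le (n : Int) (h1 : 0 < n) (h2 : n ≤ 2147483648) : PySem.Int.bitLength n ≤ 32 := by
  by_contra h
  have hle := PySem.Int.two_pow_bitLength_le n (by omega)
  have h32 : (2 : Nat) ^ 32 ≤ 2 ^ (PySem.Int.bitLength n - 1) :=
    Nat.pow_le_pow_right (by norm_num) (by omega)
  have e1 : (2 : Nat) ^ 32 = 4294967296 := by norm_num
  omega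

-- ===== VERDICT (by name: the statement is the Claim_ definition above) =====
theorem set_all_odd_bits_spec : Claim_equal_set_all_odd_bits := by
  intro n hdom
  unfold Dom_set_all_odd_bits pvDomInt at hdom
  simp only [decide_eq_true_eq] at hdom
  unfold Spec_set_all_odd_bits set_all_odd_bits set_all_odd_bits_alt
  by_cases hp : 0 < n
  · rw [if_neg (by omega)]
    rw [pvLoop_eq n n 0 (le_of_lt hp)]
    rw [if_pos hp]
    rw [mask_closed _ (by have := bl_le n hp (by omega); omega)]
  · rw [pvLoop]
    rw [if_neg hp, if_pos (by omega : n ≤ 0)]
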